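-- pv_equiv track=rewrite | github.com/imjoseangel/sandbox | python/code-optimization/main.py | standardize_name
-- ===== SOURCE A (Python) =====
-- def standardize_name(street_name):
--     standard_street_names = [
--         "Brattle St",
--         "Mount Auburn St",
--         "Massachusetts Ave",
--         "Cardinal Medeiros Ave",
--         "Hampshire Street",
--         "Beacon St",
--         "Blake St",
--         "Beech St",
--         "Garden St",
--     ]
--
--     # Exact match:
--     if street_name in standard_street_names:
--         return street_name
--
--     # Different case:
--     lower_name = street_name.lower()
--     for street in standard_street_names:
--         if lower_name == street.lower():
--             return street
--
--     # "Ave." and "Avenue" are possible synonyms of "Ave":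
--     parts = street_name.split()
--     if parts[-1].lower() in ("ave.", "avenue"):
--         parts[-1] = "Ave"
--         fixed_street_name = " ".join(parts)
--         return standardize_name(fixed_street_name)
--
--     # "St." and "Street" are possible synonyms of "St":
--     if parts[-1].lower() in ("st.", "street"):
--         parts[-1] = "St"
--         fixed_street_name = " ".join(parts)
--         return standardize_name(fixed_street_name)
--
--     raise ValueError(f"Unknown street {street_name}")
-- ===== SOURCE B (Python) =====
-- _STANDARD_STREET_NAMES = [
--     "Brattle St",
--     "Mount Auburn St",
--     "Massachusetts Ave",
--     "Cardinal Medeiros Ave",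
--     "Hampshire Street",
--     "Beacon St",
--     "Blake St",
--     "Beech St",
--     "Garden St",
-- ]
--
-- _LOOKUP = {name.lower(): name for name in _STANDARD_STREET_NAMES}
--
--
-- def standardize_name(street_name):
--     # One case-insensitive dict lookup covers both the exact-match and the
--     # case-different scans of the original.
--     key = street_name.lower()
--     if key in _LOOKUP:
--         return _LOOKUP[key]
--     # Rewrite a synonym suffix and try one more direct lookup (no recursion).
--     parts = street_name.split()
--     last = parts[-1].lower()
--     if last in ("ave.", "avenue"):
--         parts[-1] = "Ave"
--     elif last in ("st.", "street"):
--         parts[-1] = "St"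
--     else:
--         raise ValueError(f"Unknown street {street_name}")
--     candidate = " ".join(parts)
--     ckey = candidate.lower()
--     if ckey in _LOOKUP:
--         return _LOOKUP[ckey]
--     raise ValueError(f"Unknown street {candidate}")
-- ===== Notes on version B (the rewrite author's own statement) =====
-- stated objective: simpler
-- what changed: Replaces A's exact-match scan, case-insensitive linear scan and single-level tail recursion by one precomputed lowercase->canonical dict: one lookup on the lowered name, then (after rewriting a synonym suffix) one more direct lookup, with no rescans and no recursion.
import Mathlib
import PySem

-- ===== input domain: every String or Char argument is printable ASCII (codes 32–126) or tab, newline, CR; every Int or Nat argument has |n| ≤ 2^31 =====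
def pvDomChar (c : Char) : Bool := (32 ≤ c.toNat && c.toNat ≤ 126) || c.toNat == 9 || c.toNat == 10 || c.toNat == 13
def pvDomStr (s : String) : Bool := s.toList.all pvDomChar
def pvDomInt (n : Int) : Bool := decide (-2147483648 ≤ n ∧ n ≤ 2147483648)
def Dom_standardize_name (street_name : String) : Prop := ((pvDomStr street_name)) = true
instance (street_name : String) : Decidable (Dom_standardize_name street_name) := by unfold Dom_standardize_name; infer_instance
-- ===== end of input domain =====

-- B replaces A's scans of the name list (exact match, case-insensitive loop, tail recursion
-- after a synonym rewrite) by one precomputed lowercase->canonical dict and at most two lookups.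

-- ===== PORT A =====
def stdStreetNames : List String :=
  ["Brattle St", "Mount Auburn St", "Massachusetts Ave", "Cardinal Medeiros Ave",
   "Hampshire Street", "Beacon St", "Blake St", "Beech St", "Garden St"]

-- Python A recurses after rewriting the last word to "Ave"/"St"; a rewritten name can never
-- trigger another rewrite, so fuel 2 makes the recursion structural without changing the
-- computed value on any input.  "" marks the raising branches (IndexError on a name with no
-- words, ValueError on an unknown street), excluded by Pre_.
def standardize_core : Nat → String → String
  | 0, _ => ""
  | n + 1, street_name =>
    if street_name ∈ stdStreetNames then street_name
    else
      let lower_name := PySem.Str.lower street_name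
      match stdStreetNames.find? (fun street => lower_name == PySem.Str.lower street) with
      | some street => street
      | none =>
        let parts := PySem.Str.split₀ street_name
        match PySem.List.pyGet? parts (-1) with
        | none => ""  -- IndexError
        | some lastWord =>
          if PySem.Str.lower lastWord = "ave." ∨ PySem.Str.lower lastWord = "avenue" then
            standardize_core n (PySem.Str.join " " (parts.dropLast ++ ["Ave"]))
          else if PySem.Str.lower lastWord = "st." ∨ PySem.Str.lower lastWord = "street" then
            standardize_core n (PySem.Str.join " " (parts.dropLast ++ ["St"]))
          else ""  -- ValueError

def standardize_name (street_name : String) : String := standardize_core 2 street_name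

-- ===== PORT B =====
-- _LOOKUP = {name.lower(): name for name in _STANDARD_STREET_NAMES}
def stdLookup : PySem.Dict String String :=
  stdStreetNames.foldl (fun d name => d.insert (PySem.Str.lower name) name) PySem.Dict.empty

def standardize_name_alt (street_name : String) : String :=
  let key := PySem.Str.lower street_name
  match stdLookup.get? key with
  | some v => v
  | none =>
    let parts := PySem.Str.split₀ street_name
    match PySem.List.pyGet? parts (-1) with
    | none => ""  -- IndexError
    | some lastWord =>
      let last := PySem.Str.lower lastWord
      let newLast : Option String :=
        if last = "ave." ∨ last = "avenue" then some "Ave"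
        else if last = "st." ∨ last = "street" then some "St"
        else none
      match newLast with
      | none => ""  -- ValueError
      | some nl =>
        let candidate := PySem.Str.join " " (parts.dropLast ++ [nl])
        match stdLookup.get? (PySem.Str.lower candidate) with
        | some v => v
        | none => ""  -- ValueError

-- ===== PRECONDITION & SPEC =====
-- Pre_ holds exactly where the Python A returns normally: the lowered name is a lowered
-- standard name, or the name has words, its last word is an "Ave"/"St" synonym and the
-- rewritten name's lowering is a lowered standard name (A raises ValueError / IndexError
-- everywhere else).
-- the standard names as Python's .lower() produces them (= stdStreetNames.map lower, proved below)
def stdLowerNames : List String :=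
  ["brattle st", "mount auburn st", "massachusetts ave", "cardinal medeiros ave",
   "hampshire street", "beacon st", "blake st", "beech st", "garden st"]

def Pre_standardize_name (street_name : String) : Prop :=
  PySem.Str.lower street_name ∈ stdLowerNames ∨
  (PySem.Str.split₀ street_name ≠ [] ∧
    ((PySem.Str.lower (PySem.Str.split₀ street_name).getLast! = "ave." ∨
      PySem.Str.lower (PySem.Str.split₀ street_name).getLast! = "avenue") ∧
      PySem.Str.lower (PySem.Str.join " " ((PySem.Str.split₀ street_name).dropLast ++ ["Ave"]))
        ∈ stdLowerNames ∨
     (PySem.Str.lower (PySem.Str.split₀ street_name).getLast! = "st." ∨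
      PySem.Str.lower (PySem.Str.split₀ street_name).getLast! = "street") ∧
      PySem.Str.lower (PySem.Str.join " " ((PySem.Str.split₀ street_name).dropLast ++ ["St"]))
        ∈ stdLowerNames))

instance (street_name : String) : Decidable (Pre_standardize_name street_name) := by
  unfold Pre_standardize_name; infer_instance

def pvWitness_standardize_name : String := "Beacon Street"

def Spec_standardize_name (street_name : String) (out : String) : Prop := out = standardize_name_alt street_name
instance (street_name : String) (out : String) : Decidable (Spec_standardize_name street_name out) := by unfold Spec_standardize_name; infer_instance

-- ===== CLAIM (what is proved, stated in full; the proofs are below) =====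
def Claim_equal_standardize_name : Prop := ∀ (street_name : String), Dom_standardize_name street_name → Pre_standardize_name street_name → Spec_standardize_name street_name (standardize_name street_name)

-- ===== LEMMAS AND PROOFS =====

-- B's dict lookup computes exactly A's first-match scan of the lowered standard names.
theorem lookup_eq_find (k : String) :
    stdLookup.get? k = stdStreetNames.find? (fun st => k == PySem.Str.lower st) := by
  by_cases h1 : k = PySem.Str.lower "Brattle St"
  · subst h1; decide
  by_cases h2 : k = PySem.Str.lower "Mount Auburn St"
  · subst h2; decide
  by_cases h3 : k = PySem.Str.lower "Massachusetts Ave"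
  · subst h3; decide
  by_cases h4 : k = PySem.Str.lower "Cardinal Medeiros Ave"
  · subst h4; decide
  by_cases h5 : k = PySem.Str.lower "Hampshire Street"
  · subst h5; decide
  by_cases h6 : k = PySem.Str.lower "Beacon St"
  · subst h6; decide
  by_cases h7 : k = PySem.Str.lower "Blake St"
  · subst h7; decide
  by_cases h8 : k = PySem.Str.lower "Beech St"
  · subst h8; decide
  by_cases h9 : k = PySem.Str.lower "Garden St"
  · subst h9; decide
  have b1 : (k == PySem.Str.lower "Brattle St") = false := beq_eq_false_iff_ne.mpr h1
  have b2 : (k == PySem.Str.lower "Mount Auburn St") = false := beq_eq_false_iff_ne.mpr h2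
  have b3 : (k == PySem.Str.lower "Massachusetts Ave") = false := beq_eq_false_iff_ne.mpr h3
  have b4 : (k == PySem.Str.lower "Cardinal Medeiros Ave") = false := beq_eq_false_iff_ne.mpr h4
  have b5 : (k == PySem.Str.lower "Hampshire Street") = false := beq_eq_false_iff_ne.mpr h5
  have b6 : (k == PySem.Str.lower "Beacon St") = false := beq_eq_false_iff_ne.mpr h6
  have b7 : (k == PySem.Str.lower "Blake St") = false := beq_eq_false_iff_ne.mpr h7
  have b8 : (k == PySem.Str.lower "Beech St") = false := beq_eq_false_iff_ne.mpr h8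
  have b9 : (k == PySem.Str.lower "Garden St") = false := beq_eq_false_iff_ne.mpr h9
  simp [stdLookup, stdStreetNames, List.find?, PySem.Dict.get?_insert, PySem.Dict.get?_empty,
    b1,b2,b3,b4,b5,b6,b7,b8,b9, h1,h2,h3,h4,h5,h6,h7,h8,h9]

theorem stdLowerNames_eq : stdLowerNames = stdStreetNames.map PySem.Str.lower := by decide

theorem nodup_lowered : (stdStreetNames.map PySem.Str.lower).Nodup := by decide

-- on a list whose lowerings are distinct, the first case-insensitive match of a member is itself
theorem find?_lower_of_mem {l : List String} (hnd : (l.map PySem.Str.lower).Nodup) {c : String}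
    (hc : c ∈ l) :
    l.find? (fun st => PySem.Str.lower c == PySem.Str.lower st) = some c := by
  induction l with
  | nil => cases hc
  | cons a t ih =>
    rw [List.map_cons, List.nodup_cons] at hnd
    by_cases hca : PySem.Str.lower c = PySem.Str.lower a
    · have hcea : c = a := by
        rcases List.mem_cons.mp hc with rfl | hct
        · rfl
        · exact absurd (hca ▸ List.mem_map_of_mem hct) hnd.1
      subst hcea
      simp [List.find?]
    · rw [List.find?_cons_of_neg (by simpa using hca)]
      exact ih hnd.2 (List.mem_cons.mp hc |>.resolve_left (fun h => hca (h ▸ rfl)))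

-- A's first two phases: whenever the case-insensitive scan would find v, the core returns v
theorem core_of_find (n : Nat) (c v : String)
    (h : stdStreetNames.find? (fun st => PySem.Str.lower c == PySem.Str.lower st) = some v) :
    standardize_core (n + 1) c = v := by
  by_cases hc : c ∈ stdStreetNames
  · rw [find?_lower_of_mem nodup_lowered hc] at h
    simpa [standardize_core, hc] using (Option.some_inj.mp h)
  · simp [standardize_core, hc, h]

theorem getLast?_eq_getLast! {l : List String} (h : l ≠ []) : l.getLast? = some l.getLast! := by
  induction l with
  | nil => exact absurd rfl h
  | cons a t ih =>
    cases t with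
    | nil => rfl
    | cons b u => simpa [List.getLast?_cons_cons, List.getLast!] using ih (by simp)

theorem mem_lowered_find?_isSome {c : String}
    (h : PySem.Str.lower c ∈ stdStreetNames.map PySem.Str.lower) :
    ∃ v, stdStreetNames.find? (fun st => PySem.Str.lower c == PySem.Str.lower st) = some v := by
  obtain ⟨st, hst, heq⟩ := List.mem_map.mp h
  exact Option.isSome_iff_exists.mp (List.find?_isSome.mpr ⟨st, hst, by simp [heq]⟩)

-- ===== VERDICT (by name: the statement is the Claim_ definition above) =====
set_option maxRecDepth 8192 in
theorem standardize_name_spec : Claim_equal_standardize_name := by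
  intro s _ hpre
  rw [Pre_standardize_name, stdLowerNames_eq] at hpre
  unfold Spec_standardize_name
  by_cases hmem : PySem.Str.lower s ∈ stdStreetNames.map PySem.Str.lower
  · obtain ⟨v, hv⟩ := mem_lowered_find?_isSome hmem
    have hA : standardize_name s = v := core_of_find 1 s v hv
    have hB : standardize_name_alt s = v := by
      simp [standardize_name_alt, lookup_eq_find, hv]
    rw [hA, hB]
  · -- the first lookup/scans fail; Pre_ gives the synonym-rewrite branch
    rcases hpre with hmem' | ⟨hne, hrest⟩
    · exact absurd hmem' hmem
    have hfind : stdStreetNames.find? (fun st => PySem.Str.lower s == PySem.Str.lower st) = none :=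
      List.find?_eq_none.mpr (fun st hst => by
        simp only [beq_iff_eq]
        exact fun heq => hmem (heq ▸ List.mem_map_of_mem hst))
    have hc : s ∉ stdStreetNames := fun h => hmem (List.mem_map_of_mem h)
    have hl0 : (PySem.Str.split₀ s).getLast? = some (PySem.Str.split₀ s).getLast! :=
      getLast?_eq_getLast! hne
    rcases hrest with ⟨hsyn, hcand⟩ | ⟨hsyn, hcand⟩ <;>
      obtain ⟨v, hv⟩ := mem_lowered_find?_isSome hcand
    · -- "Ave." / "Avenue" branch
      have hA : standardize_name s = v := by
        show standardize_core 2 s = v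
        rw [show (2:Nat) = Nat.succ 1 from rfl, standardize_core.eq_2, if_neg hc]
        simp only [hfind]
        simp only [PySem.List.pyGet?_neg_one, hl0]
        rw [if_pos hsyn]
        exact core_of_find 0 _ v hv
      have hB : standardize_name_alt s = v := by
        simp only [standardize_name_alt, lookup_eq_find]
        simp only [hfind]
        simp only [PySem.List.pyGet?_neg_one, hl0]
        rw [if_pos hsyn]
        simp only [hv]
      rw [hA, hB]
    · -- "St." / "Street" branch
      have hnotave : ¬ (PySem.Str.lower (PySem.Str.split₀ s).getLast! = "ave." ∨
          PySem.Str.lower (PySem.Str.split₀ s).getLast! = "avenue") := by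
        rcases hsyn with h | h <;>
          (intro hcon; rcases hcon with h2 | h2 <;> rw [h] at h2 <;> exact absurd h2 (by decide))
      have hA : standardize_name s = v := by
        show standardize_core 2 s = v
        rw [show (2:Nat) = Nat.succ 1 from rfl, standardize_core.eq_2, if_neg hc]
        simp only [hfind]
        simp only [PySem.List.pyGet?_neg_one, hl0]
        rw [if_neg hnotave, if_pos hsyn]
        exact core_of_find 0 _ v hv
      have hB : standardize_name_alt s = v := by
        simp only [standardize_name_alt, lookup_eq_find]
        simp only [hfind]
        simp only [PySem.List.pyGet?_neg_one, hl0]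
        rw [if_neg hnotave, if_pos hsyn]
        simp only [hv]
      rw [hA, hB]
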